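-- pv_equiv track=rewrite | github.com/liuj001/jiucuo | yolo/process/all_detections_filt_third.py | find_substring_indices
-- ===== SOURCE A (Python) =====
-- def find_substring_indices(long_string, string_array,window_size):
--     """
--     This function finds all occurrences of substrings in a given long string.
--     The substrings should be of the specified window_size and present in string_array.
--
--     Args:
--     long_string (str): The string in which we want to find the substrings.
--     string_array (list): List of substrings to search for.
--     window_size (int): The length of each substring to find.
--
--     Returns:
--     dict: A dictionary where the key is the substring, and the value is a list of indices where the substring is found.
--     """
--     substring_indices = {}
--     substring_length = window_size
--     for i in range(len(long_string) - substring_length + 1):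
--         substring = long_string[i:i + substring_length]
--         if substring in string_array:
--             if substring not in substring_indices:
--                 substring_indices[substring] = []
--             substring_indices[substring].append(i)
--     return substring_indices
-- ===== SOURCE B (Python) =====
-- def find_substring_indices(long_string, string_array, window_size):
--     found = {}
--     for pattern in string_array:
--         if len(pattern) == window_size and pattern not in found:
--             hits = [i for i in range(len(long_string) - window_size + 1)
--                     if long_string[i:i + window_size] == pattern]
--             if hits:
--                 found[pattern] = hits
--     return dict(sorted(found.items(), key=lambda kv: kv[1][0]))
-- ===== Notes on version B (the rewrite author's own statement) =====
-- stated objective: faster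
-- what changed: Instead of sweeping every window position once and testing each slice for membership in string_array, B scans per distinct pattern of the right length, collects its hit positions in one comprehension, and sorts the resulting entries by first hit to recover A's first-occurrence key order.
-- outside the precondition, e.g. on find_substring_indices('ab', [''], -1): A returns {'': [1, 2, 3]}, B returns {}
import Mathlib
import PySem

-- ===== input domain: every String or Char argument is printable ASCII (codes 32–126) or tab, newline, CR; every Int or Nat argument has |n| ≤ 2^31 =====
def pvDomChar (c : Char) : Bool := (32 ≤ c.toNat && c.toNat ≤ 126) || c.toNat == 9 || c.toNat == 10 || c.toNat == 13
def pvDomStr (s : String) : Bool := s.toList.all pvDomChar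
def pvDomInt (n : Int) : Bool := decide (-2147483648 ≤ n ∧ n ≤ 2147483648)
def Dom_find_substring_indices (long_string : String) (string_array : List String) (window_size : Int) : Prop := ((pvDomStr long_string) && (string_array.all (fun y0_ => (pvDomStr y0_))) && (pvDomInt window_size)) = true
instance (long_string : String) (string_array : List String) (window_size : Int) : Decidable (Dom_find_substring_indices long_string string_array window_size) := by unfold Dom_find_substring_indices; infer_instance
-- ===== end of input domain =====

-- B replaces A's single sweep over window positions (each slice tested for membership in string_array)
-- by one scan per distinct right-length pattern, then a sort on first hit; measured faster in a timing run.


-- ===== PORT A =====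
-- literal port of A: one pass over i in range(len(s) - window_size + 1); slice, membership test,
-- conditional `substring_indices[substring] = []`, then append.
def find_substring_indices (long_string : String) (string_array : List String) (window_size : Int) : List (String × List Int) :=
  let d := (PySem.List.pyRange 0 (PySem.Str.len long_string - window_size + 1) 1).foldl
    (fun (d : PySem.Dict String (List Int)) i =>
      let substring := PySem.Str.slice long_string (some i) (some (i + window_size))
      if substring ∈ string_array then
        let d := if d.contains substring then d else d.insert substring []
        d.modify substring [] (fun l => l ++ [i])
      else d)
    PySem.Dict.empty
  d.items

-- ===== PORT B =====
-- literal port of B (Source B): for each pattern of the right length not yet found, collect its hit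
-- positions by one comprehension; keep non-empty entries; dict(sorted(..., key=kv[1][0])) — the
-- keys are distinct, so dict() of the sorted pairs is the sorted pair list itself.
def find_substring_indices_alt (long_string : String) (string_array : List String) (window_size : Int) : List (String × List Int) :=
  let found := string_array.foldl
    (fun (found : PySem.Dict String (List Int)) pattern =>
      if (PySem.Str.len pattern : Int) = window_size ∧ ¬ found.contains pattern then
        let hits := (PySem.List.pyRange 0 (PySem.Str.len long_string - window_size + 1) 1).filter
          (fun i => PySem.Str.slice long_string (some i) (some (i + window_size)) == pattern)
        if hits ≠ [] then found.insert pattern hits else found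
      else found)
    PySem.Dict.empty
  PySem.List.sorted found.items (fun kv => PySem.List.pyGetD kv.2 0 0) false

-- ===== PRECONDITION & SPEC =====
-- Pre_ restricts to the natural domain of a window length: window_size ≥ 0. For negative
-- window_size A's slice arithmetic still returns a dict built from accidental substrings of
-- other lengths (an artefact of Python's negative slice bounds), while B naturally finds no
-- pattern of negative length.
def Pre_find_substring_indices (long_string : String) (string_array : List String) (window_size : Int) : Prop := 0 ≤ window_size
instance (long_string : String) (string_array : List String) (window_size : Int) : Decidable (Pre_find_substring_indices long_string string_array window_size) := by unfold Pre_find_substring_indices; infer_instance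
def pvWitness_find_substring_indices : String × List String × Int := ("abcab", ["ab", "ca", "zz"], 2)

def Spec_find_substring_indices (long_string : String) (string_array : List String) (window_size : Int) (out : List (String × List Int)) : Prop := out = find_substring_indices_alt long_string string_array window_size
instance (long_string : String) (string_array : List String) (window_size : Int) (out : List (String × List Int)) : Decidable (Spec_find_substring_indices long_string string_array window_size out) := by unfold Spec_find_substring_indices; infer_instance

-- ===== CLAIM (what is proved, stated in full; the proofs are below) =====
def Claim_equal_find_substring_indices : Prop := ∀ (long_string : String) (string_array : List String) (window_size : Int), Dom_find_substring_indices long_string string_array window_size → Pre_find_substring_indices long_string string_array window_size → Spec_find_substring_indices long_string string_array window_size (find_substring_indices long_string string_array window_size)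


-- ===== LEMMAS AND PROOFS =====

-- abbreviations for the proof (proof-only; defined below the claim block)
def pvWin (s : String) (ws i : Int) : String := PySem.Str.slice s (some i) (some (i + ws))
def pvRng (s : String) (ws : Int) : List Int := PySem.List.pyRange 0 (PySem.Str.len s - ws + 1) 1
def pvHits (s : String) (ws : Int) (p : String) : List Int := (pvRng s ws).filter (fun i => pvWin s ws i == p)
def pvEntry (s : String) (ws : Int) (p : String) : String × List Int := (p, pvHits s ws p)
def pvF (s : String) (arr : List String) (ws : Int) : List Int := (pvRng s ws).filter (fun i => decide (pvWin s ws i ∈ arr))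
def pvK (s : String) (arr : List String) (ws : Int) : List String := PySem.Set.ofList ((pvF s arr ws).map (pvWin s ws))
def pvGood (s : String) (ws : Int) (p : String) : Bool := ((PySem.Str.len p : Int) == ws) && !(pvHits s ws p).isEmpty
def pvKb (s : String) (arr : List String) (ws : Int) : List String := PySem.List.dedup (arr.filter (pvGood s ws))

-- A's conditional insert-then-modify collapses to a single modify
lemma pvStepA_eq (d : PySem.Dict String (List Int)) (sub : String) (i : Int) :
    (if d.contains sub then d else d.insert sub []).modify sub [] (fun l => l ++ [i])
      = d.modify sub [] (fun l => l ++ [i]) := by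
  by_cases h : d.contains sub
  · simp [h]
  · simp only [h, Bool.false_eq_true, ite_false]
    simp only [PySem.Dict.modify, PySem.Dict.getD_insert_self,
      PySem.Dict.insert_insert_self, PySem.Dict.getD_of_not_contains d [] (by simpa using h)]

-- a window taken inside the range has exactly length ws
lemma pvLen_win (s : String) (ws i : Int) (hws : 0 ≤ ws) (hi : i ∈ pvRng s ws) :
    (PySem.Str.len (pvWin s ws i) : Int) = ws := by
  unfold pvRng at hi
  rcases PySem.List.mem_pyRange_one.1 hi with ⟨h0, h1⟩
  rw [PySem.Str.len_eq] at h1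
  unfold pvWin
  rw [PySem.Str.len_eq, PySem.Str.toList_slice, PySem.Chars.slice_eq_listSlice,
    PySem.List.length_slice]
  unfold PySem.List.clampIdx
  split_ifs <;> push_cast <;> omega


lemma pvMem_K_iff (s : String) (arr : List String) (ws : Int) (hws : 0 ≤ ws) (p : String) :
    p ∈ pvK s arr ws ↔ p ∈ pvKb s arr ws := by
  unfold pvK pvKb
  rw [PySem.Set.mem_ofList, PySem.List.mem_dedup, List.mem_filter]
  constructor
  · intro hp
    rcases List.mem_map.1 hp with ⟨i, hiF, hw⟩
    rcases List.mem_filter.1 hiF with ⟨hiR, hiarr⟩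
    have hparr : p ∈ arr := hw ▸ of_decide_eq_true hiarr
    refine ⟨hparr, ?_⟩
    unfold pvGood
    have hlen : (PySem.Str.len p : Int) = ws := hw ▸ pvLen_win s ws i hws hiR
    have hmem : i ∈ pvHits s ws p := by
      unfold pvHits; exact List.mem_filter.2 ⟨hiR, by simp [hw]⟩
    have hne : (pvHits s ws p).isEmpty = false := by
      cases h : pvHits s ws p with
      | nil => rw [h] at hmem; simp at hmem
      | cons a t => simp
    simp [hne]
    simpa using hlen
  · rintro ⟨hparr, hgood⟩
    unfold pvGood at hgood
    have hne : (pvHits s ws p) ≠ [] := by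
      intro h; rw [h] at hgood; simp at hgood
    rcases List.exists_mem_of_ne_nil _ hne with ⟨i, hi⟩
    rcases List.mem_filter.1 hi with ⟨hiR, hieq⟩
    have hw : pvWin s ws i = p := by simpa using hieq
    exact List.mem_map.2 ⟨i, List.mem_filter.2 ⟨hiR, by simp [hw, hparr]⟩, hw⟩

-- head of a non-empty list via pyGetD
lemma pvHead_mem (l : List Int) (h : l ≠ []) : PySem.List.pyGetD l 0 0 ∈ l := by
  cases l with
  | nil => simp at h
  | cons a t => simp [PySem.List.pyGetD, PySem.List.pyGet?, PySem.List.pyIdx?]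


lemma pvHead_append (l t : List Int) (h : l ≠ []) :
    PySem.List.pyGetD (l ++ t) 0 0 = PySem.List.pyGetD l 0 0 := by
  cases l with
  | nil => simp at h
  | cons a s =>
    have h1 : (0:Int) ≤ (s.length:Int) + (t.length:Int) := by positivity
    simp [PySem.List.pyGetD, PySem.List.pyGet?, PySem.List.pyIdx?, h1]

-- first occurrences of values of g along an increasing list are themselves increasing
lemma pvPairwise_firstocc (L : List Int) (g : Int → String) (hL : L.Pairwise (· < ·)) :
    (PySem.Set.ofList (L.map g)).Pairwise
      (fun p q => PySem.List.pyGetD (L.filter (fun i => g i == p)) 0 0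
                < PySem.List.pyGetD (L.filter (fun i => g i == q)) 0 0) := by
  induction L using List.reverseRecOn with
  | nil => simp [PySem.Set.ofList]
  | append_singleton L x ih =>
    rcases List.pairwise_append.mp hL with ⟨hL1, _, hlt⟩
    have ih' := ih hL1
    have hne : ∀ p ∈ PySem.Set.ofList (L.map g), L.filter (fun i => g i == p) ≠ [] := by
      intro p hp
      rcases List.mem_map.1 ((PySem.Set.mem_ofList _ _).1 hp) with ⟨i, hi, hgi⟩
      exact List.ne_nil_of_mem (List.mem_filter.2 ⟨hi, by simp [hgi]⟩)
    have hhead : ∀ p ∈ PySem.Set.ofList (L.map g),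
        PySem.List.pyGetD ((L ++ [x]).filter (fun i => g i == p)) 0 0
          = PySem.List.pyGetD (L.filter (fun i => g i == p)) 0 0 := by
      intro p hp
      rw [List.filter_append]
      exact pvHead_append _ _ (hne p hp)
    rw [List.map_append, List.map_singleton, PySem.Set.ofList_append_singleton]
    by_cases hx : g x ∈ PySem.Set.ofList (L.map g)
    · rw [PySem.Set.add_of_mem hx]
      exact ih'.imp_of_mem (fun {p q} hp hq h => by rw [hhead p hp, hhead q hq]; exact h)
    · rw [PySem.Set.add_of_not_mem hx]
      refine List.pairwise_append.2 ⟨ih'.imp_of_mem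
        (fun {p q} hp hq h => by rw [hhead p hp, hhead q hq]; exact h),
        List.pairwise_singleton _ _, ?_⟩
      intro p hp q hq
      have hqx := List.mem_singleton.1 hq
      subst hqx
      rw [hhead p hp]
      have hLx : L.filter (fun i => g i == g x) = [] := by
        rw [List.filter_eq_nil_iff]
        intro i hi hgi
        exact hx ((PySem.Set.mem_ofList _ _).2 (List.mem_map.2 ⟨i, hi, by simpa using hgi⟩))
      have hfx : (L ++ [x]).filter (fun i => g i == g x) = [x] := by
        rw [List.filter_append, hLx]; simp
      rw [hfx]
      have hmem := pvHead_mem _ (hne p hp)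
      have hplt : PySem.List.pyGetD (L.filter (fun i => g i == p)) 0 0 < x :=
        hlt _ (List.mem_of_mem_filter hmem) x (List.mem_singleton_self x)
      simpa [PySem.List.pyGetD, PySem.List.pyGet?, PySem.List.pyIdx?] using hplt

-- members of pvK occur in arr, and their F-filter equals their full hit list
lemma pvMem_K_arr (s : String) (arr : List String) (ws : Int) (p : String) (hp : p ∈ pvK s arr ws) :
    p ∈ arr := by
  unfold pvK at hp
  rcases (by simpa using (PySem.Set.mem_ofList _ _).1 hp : ∃ i ∈ pvF s arr ws, pvWin s ws i = p) with ⟨i, hi, hw⟩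
  unfold pvF at hi
  rcases List.mem_filter.1 hi with ⟨_, hmem⟩
  rw [← hw]; exact of_decide_eq_true hmem


lemma pvFilter_F (s : String) (arr : List String) (ws : Int) (p : String) (hp : p ∈ arr) :
    (pvF s arr ws).filter (fun i => pvWin s ws i == p) = pvHits s ws p := by
  unfold pvF pvHits
  rw [List.filter_filter]
  refine List.filter_congr (fun i _ => ?_)
  by_cases h : pvWin s ws i == p
  · have : pvWin s ws i = p := by simpa using h
    simp [this, hp]
  · simp [h]

-- A's result: keys in first-occurrence order, each with all of its hit positions
lemma pvA_items (s : String) (arr : List String) (ws : Int) :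
    find_substring_indices s arr ws = (pvK s arr ws).map (pvEntry s ws) := by
  unfold find_substring_indices
  have hstep : (fun (d : PySem.Dict String (List Int)) (i : Int) =>
        let substring := PySem.Str.slice s (some i) (some (i + ws))
        if substring ∈ arr then
          let d := if d.contains substring then d else d.insert substring []
          d.modify substring [] (fun l => l ++ [i])
        else d)
      = (fun (d : PySem.Dict String (List Int)) (i : Int) =>
          if decide (pvWin s ws i ∈ arr) = true
          then d.modify (pvWin s ws i) [] (fun l => l ++ [i]) else d) := by
    funext d i
    by_cases h : PySem.Str.slice s (some i) (some (i + ws)) ∈ arr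
    · have hd : decide (pvWin s ws i ∈ arr) = true := by simpa [pvWin] using h
      simp only [pvWin] at hd ⊢
      rw [if_pos h, if_pos hd]
      exact pvStepA_eq d _ i
    · have hd : ¬ (decide (pvWin s ws i ∈ arr) = true) := by simpa [pvWin] using h
      simp only [pvWin] at hd ⊢
      rw [if_neg h, if_neg hd]
  rw [hstep, ← List.foldl_filter]
  have hpairs : ((pvRng s ws).filter (fun i => decide (pvWin s ws i ∈ arr))).foldl
      (fun (d : PySem.Dict String (List Int)) (i : Int) =>
        d.modify (pvWin s ws i) [] (fun l => l ++ [i])) PySem.Dict.empty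
      = ((pvF s arr ws).map (fun i => (pvWin s ws i, i))).foldl
          (fun (d : PySem.Dict String (List Int)) p =>
            d.modify p.1 [] (fun l => l ++ [p.2])) PySem.Dict.empty := by
    rw [List.foldl_map]
    rfl
  rw [show PySem.List.pyRange 0 (PySem.Str.len s - ws + 1) 1 = pvRng s ws from rfl, hpairs]
  set pairs := (pvF s arr ws).map (fun i => (pvWin s ws i, i)) with hpairsdef
  set D := pairs.foldl (fun (d : PySem.Dict String (List Int)) p =>
    d.modify p.1 [] (fun l => l ++ [p.2])) PySem.Dict.empty with hD
  have hkeys : D.keys = pvK s arr ws := by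
    rw [hD, PySem.Dict.keys_foldl_modify_key pairs (fun p => p.1) []
      (fun _ p => (fun l => l ++ [p.2])) PySem.Dict.empty]
    rw [PySem.Dict.keys_empty, PySem.Set.update_nil_left, hpairsdef, List.map_map]
    rfl
  have hnodup : D.keys.Nodup := by
    rw [hD]
    exact PySem.Dict.nodup_keys_foldl_modify_key pairs (fun p => p.1) []
      (fun _ p => (fun l => l ++ [p.2])) PySem.Dict.empty (by simp [PySem.Dict.keys_empty])
  rw [PySem.Dict.items_eq_map_keys D hnodup [], hkeys]
  refine List.map_congr_left (fun k hk => ?_)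
  have hgetD : D.getD k [] = pvHits s ws k := by
    rw [hD, PySem.Dict.getD_foldl_modify_append pairs PySem.Dict.empty k]
    rw [PySem.Dict.getD_empty, List.nil_append, hpairsdef, List.filter_map, List.map_map]
    have : ((fun p => p.2) ∘ fun i => (pvWin s ws i, i)) = fun i : Int => i := rfl
    rw [this, List.map_id']
    have hcomp : ((fun p : String × Int => p.1 == k) ∘ fun i => (pvWin s ws i, i))
        = fun i => pvWin s ws i == k := rfl
    rw [hcomp, pvFilter_F s arr ws k (pvMem_K_arr s arr ws k hk)]
  rw [hgetD]
  rfl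

-- B's dict: the good patterns in first-arr-occurrence order, each with its hit positions
lemma pvB_items (s : String) (arr : List String) (ws : Int) :
    find_substring_indices_alt s arr ws
      = PySem.List.sorted ((pvKb s arr ws).map (pvEntry s ws)) (fun kv => PySem.List.pyGetD kv.2 0 0) false := by
  unfold find_substring_indices_alt
  show PySem.List.sorted
      ((arr.foldl (fun (found : PySem.Dict String (List Int)) pattern =>
        if (PySem.Str.len pattern : Int) = ws ∧ ¬ found.contains pattern then
          let hits := (PySem.List.pyRange 0 (PySem.Str.len s - ws + 1) 1).filter
            (fun i => PySem.Str.slice s (some i) (some (i + ws)) == pattern)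
          if hits ≠ [] then found.insert pattern hits else found
        else found) PySem.Dict.empty).items) _ false = _
  suffices h : ∀ l : List String,
      (l.foldl (fun (found : PySem.Dict String (List Int)) pattern =>
        if (PySem.Str.len pattern : Int) = ws ∧ ¬ found.contains pattern then
          let hits := (PySem.List.pyRange 0 (PySem.Str.len s - ws + 1) 1).filter
            (fun i => PySem.Str.slice s (some i) (some (i + ws)) == pattern)
          if hits ≠ [] then found.insert pattern hits else found
        else found) PySem.Dict.empty).items
      = (PySem.List.dedup (l.filter (pvGood s ws))).map (pvEntry s ws) by
    rw [h arr]; rfl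
  intro l
  induction l using List.reverseRecOn with
  | nil => rfl
  | append_singleton l x ih =>
    rw [List.foldl_append, List.foldl_cons, List.foldl_nil]
    set Dl := l.foldl (fun (found : PySem.Dict String (List Int)) pattern =>
        if (PySem.Str.len pattern : Int) = ws ∧ ¬ found.contains pattern then
          let hits := (PySem.List.pyRange 0 (PySem.Str.len s - ws + 1) 1).filter
            (fun i => PySem.Str.slice s (some i) (some (i + ws)) == pattern)
          if hits ≠ [] then found.insert pattern hits else found
        else found) PySem.Dict.empty with hDl
    have hhits_eq : (PySem.List.pyRange 0 (PySem.Str.len s - ws + 1) 1).filter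
        (fun i => PySem.Str.slice s (some i) (some (i + ws)) == x) = pvHits s ws x := rfl
    have hkeys : Dl.keys = PySem.List.dedup (l.filter (pvGood s ws)) := by
      show Dl.items.map (fun p => p.1) = _
      rw [ih, List.map_map]
      have : ((fun p : String × List Int => p.1) ∘ pvEntry s ws) = id := rfl
      rw [this, List.map_id]
    have hcont_iff : Dl.contains x = true ↔ x ∈ l.filter (pvGood s ws) := by
      rw [PySem.Dict.contains_iff_mem_keys, hkeys, PySem.List.mem_dedup]
    have hgood_iff : pvGood s ws x = true ↔ (PySem.Str.len x = ws ∧ pvHits s ws x ≠ []) := by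
      simp only [pvGood, Bool.and_eq_true, beq_iff_eq, Bool.not_eq_true']
      constructor
      · rintro ⟨h1, h2⟩; exact ⟨h1, by intro hnil; rw [hnil] at h2; simp at h2⟩
      · rintro ⟨h1, h2⟩
        refine ⟨h1, ?_⟩
        cases hh : pvHits s ws x with
        | nil => exact absurd hh h2
        | cons a t => simp
    rw [List.filter_append]
    by_cases hg : pvGood s ws x = true
    · rcases hgood_iff.1 hg with ⟨hlen, hne⟩
      rw [List.filter_singleton, hg, cond_true, PySem.List.dedup_eq_ofList,
        PySem.Set.ofList_append_singleton]
      by_cases hc : Dl.contains x = true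
      · have hCn : ¬ ((PySem.Str.len x : Int) = ws ∧ ¬ Dl.contains x = true) := by
          intro hC; exact hC.2 hc
        rw [if_neg hCn, PySem.Set.add_of_mem
          (by rw [PySem.Set.mem_ofList]; exact hcont_iff.1 hc), ih,
          PySem.List.dedup_eq_ofList]
      · have hC : (PySem.Str.len x : Int) = ws ∧ ¬ Dl.contains x = true := ⟨hlen, by simp [hc]⟩
        rw [if_pos hC]
        show (if (PySem.List.pyRange 0 (PySem.Str.len s - ws + 1) 1).filter
            (fun i => PySem.Str.slice s (some i) (some (i + ws)) == x) ≠ [] then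
            Dl.insert x ((PySem.List.pyRange 0 (PySem.Str.len s - ws + 1) 1).filter
              (fun i => PySem.Str.slice s (some i) (some (i + ws)) == x)) else Dl).items = _
        rw [hhits_eq, if_pos hne,
          PySem.Dict.items_insert_of_not_contains Dl _ (by simpa using hc), ih,
          PySem.Set.add_of_not_mem (by rw [PySem.Set.mem_ofList]; intro hx; exact hc (hcont_iff.2 hx)),
          List.map_append, PySem.List.dedup_eq_ofList]
        rfl
    · have hg' : pvGood s ws x = false := by simpa using hg
      rw [List.filter_singleton, hg', cond_false, List.append_nil]
      by_cases hC : (PySem.Str.len x : Int) = ws ∧ ¬ Dl.contains x = true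
      · rw [if_pos hC]
        have hempty : pvHits s ws x = [] := by
          by_contra hne
          exact hg (hgood_iff.2 ⟨hC.1, hne⟩)
        show (if (PySem.List.pyRange 0 (PySem.Str.len s - ws + 1) 1).filter
            (fun i => PySem.Str.slice s (some i) (some (i + ws)) == x) ≠ [] then
            Dl.insert x ((PySem.List.pyRange 0 (PySem.Str.len s - ws + 1) 1).filter
              (fun i => PySem.Str.slice s (some i) (some (i + ws)) == x)) else Dl).items = _
        rw [hhits_eq, if_neg (by simp [hempty]), ih]
      · rw [if_neg hC, ih]


lemma pvK_pairwise (s : String) (arr : List String) (ws : Int) :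
    ((pvK s arr ws).map (pvEntry s ws)).Pairwise
      (fun a b => PySem.List.pyGetD a.2 0 0 < PySem.List.pyGetD b.2 0 0) := by
  have hF : (pvF s arr ws).Pairwise (· < ·) := by
    unfold pvF pvRng
    exact (PySem.List.pairwise_lt_pyRange_one 0 _).filter _
  have h0 := pvPairwise_firstocc (pvF s arr ws) (pvWin s ws) hF
  rw [List.pairwise_map]
  refine h0.imp_of_mem (fun {p q} hp hq h => ?_)
  rw [pvFilter_F s arr ws p (pvMem_K_arr s arr ws p hp),
    pvFilter_F s arr ws q (pvMem_K_arr s arr ws q hq)] at h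
  exact h


-- ===== VERDICT (by name: the statement is the Claim_ definition above) =====
theorem find_substring_indices_spec : Claim_equal_find_substring_indices := by
  intro s arr ws _hdom hws
  unfold Spec_find_substring_indices
  rw [pvA_items, pvB_items]
  exact (PySem.List.sorted_eq_of_perm_of_pairwise_lt _ _ _
    (((List.perm_ext_iff_of_nodup (PySem.Set.nodup_ofList _) (PySem.List.nodup_dedup _)).2
        (fun p => (pvMem_K_iff s arr ws hws p))).map _)
    (pvK_pairwise s arr ws)).symm
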